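-- pv_equiv track=rewrite | github.com/zwangZJU/graduate_thesis_code | 1_1_show_the_cluster_result.py | del_outlier
-- ===== SOURCE A (Python) =====
-- def del_outlier(k, d):
--     '''
--     删除异常值
--     :param k:
--     :param d:
--     :return:
--     '''
--     n = len(k)
--     i = 1
--     while i<n:
--         if d[i]>d[i-1]:
--             d.pop(i)
--             k.pop(i)
--             n -= 1
--         else:
--             i += 1
--     return k, d
-- ===== SOURCE B (Python) =====
-- def del_outlier(k, d):
--     # Two phases: mark the positions of outliers in one pass over the paired
--     # values, then remove the marked positions from both lists.
--     drop = set()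
--     last = None
--     for i, (_, y) in enumerate(zip(k, d)):
--         if last is None or y <= last:
--             last = y
--         else:
--             drop.add(i)
--     k[:] = [x for i, x in enumerate(k) if i not in drop]
--     d[:] = [y for i, y in enumerate(d) if i not in drop]
--     return k, d
-- ===== Notes on version B (the rewrite author's own statement) =====
-- stated objective: alternative
-- what changed: A repeatedly pops offending elements in place while rescanning from the same index; B first marks the outlier positions in one pass over the paired values and then removes the marked positions from both lists.
import Mathlib
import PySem

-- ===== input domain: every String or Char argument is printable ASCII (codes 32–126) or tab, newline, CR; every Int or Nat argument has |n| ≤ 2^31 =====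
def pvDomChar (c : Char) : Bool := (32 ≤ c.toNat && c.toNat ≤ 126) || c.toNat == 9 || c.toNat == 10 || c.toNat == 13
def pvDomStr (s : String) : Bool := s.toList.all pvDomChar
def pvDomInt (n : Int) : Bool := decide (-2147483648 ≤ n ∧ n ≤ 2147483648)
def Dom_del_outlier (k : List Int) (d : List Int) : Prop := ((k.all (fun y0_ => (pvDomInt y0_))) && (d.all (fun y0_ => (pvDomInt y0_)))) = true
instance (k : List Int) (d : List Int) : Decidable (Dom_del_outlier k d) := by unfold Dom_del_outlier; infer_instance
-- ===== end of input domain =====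

-- B marks outlier positions in one pass over the paired values and then removes the
-- marked positions from both lists, instead of A's pop-in-place while loop
-- (objective: alternative). Both mutate k and d to the returned contents.

-- ===== PORT A =====
-- while loop of A: state (k, d, i); pop(i) ported as eraseIdx i, d[i] as getD
-- (exact under Pre_, where all accessed indices are in range).
def delLoopA (k : List Int) (d : List Int) (i : Nat) : List Int × List Int :=
  if h : i < k.length then
    if d.getD i 0 > d.getD (i - 1) 0 then
      delLoopA (k.eraseIdx i) (d.eraseIdx i) i
    else
      delLoopA k d (i + 1)
  else (k, d)
termination_by k.length - i
decreasing_by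
  · simp [List.length_eraseIdx, h]; omega
  · omega

def del_outlier (k : List Int) (d : List Int) : List Int × List Int :=
  delLoopA k d 1

-- ===== PORT B =====
-- drop = set() → PySem.Set Int; last = None → Option Int; the two comprehensions
-- over enumerate(...) → filter + map over PySem.List.enumerate.
def del_outlier_alt (k : List Int) (d : List Int) : List Int × List Int :=
  let st := (PySem.List.enumerate (List.zip k d)).foldl
    (fun (s : PySem.Set Int × Option Int) p =>
      match s.2 with
      | none => (s.1, some p.2.2)
      | some last => if p.2.2 ≤ last then (s.1, some p.2.2) else (PySem.Set.add s.1 p.1, s.2))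
    (PySem.Set.empty, none)
  (((PySem.List.enumerate k).filter (fun p => !(PySem.Set.contains st.1 p.1))).map (·.2),
   ((PySem.List.enumerate d).filter (fun p => !(PySem.Set.contains st.1 p.1))).map (·.2))

-- ===== PRECONDITION & SPEC =====
-- A raises IndexError when len(k) ≥ 2 and len(d) < len(k); Pre_ excludes exactly those inputs.
def Pre_del_outlier (k : List Int) (d : List Int) : Prop :=
  k.length ≤ 1 ∨ k.length ≤ d.length
instance (k : List Int) (d : List Int) : Decidable (Pre_del_outlier k d) := by
  unfold Pre_del_outlier; infer_instance

def pvWitness_del_outlier : List Int × List Int := ([1, 2, 3, 4], [5, 7, 4, 4])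

def Spec_del_outlier (k : List Int) (d : List Int) (out : List Int × List Int) : Prop := out = del_outlier_alt k d
instance (k : List Int) (d : List Int) (out : List Int × List Int) : Decidable (Spec_del_outlier k d out) := by unfold Spec_del_outlier; infer_instance

-- ===== CLAIM (what is proved, stated in full; the proofs are below) =====
def Claim_equal_del_outlier : Prop := ∀ (k : List Int) (d : List Int), Dom_del_outlier k d → Pre_del_outlier k d → Spec_del_outlier k d (del_outlier k d)

-- ===== LEMMAS AND PROOFS =====

-- shared characterisation: filter pairs by "d-value ≤ last kept d-value";
-- returns (kept k's, kept d's, final last value)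
def filtP (last : Int) : List Int → List Int → List Int × List Int × Int
  | [], _ => ([], [], last)
  | _ :: _, [] => ([], [], last)
  | a :: ks, b :: ds =>
    if b > last then filtP last ks ds
    else ((filtP b ks ds).1.cons a, (filtP b ks ds).2.1.cons b, (filtP b ks ds).2.2)

theorem delLoopA_eq_filtP (k d : List Int) (i : Nat)
    (hlen : k.length ≤ d.length) (h1 : 1 ≤ i) (hi : i ≤ k.length) :
    delLoopA k d i =
      (k.take i ++ (filtP (d.getD (i - 1) 0) (k.drop i) (d.drop i)).1,
       d.take i ++ (filtP (d.getD (i - 1) 0) (k.drop i) (d.drop i)).2.1 ++ d.drop k.length) := by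
  induction k, d, i using delLoopA.induct with
  | case1 k d i h hcond ih =>
    rw [delLoopA, dif_pos h, if_pos hcond]
    have hid : i < d.length := lt_of_lt_of_le h hlen
    rw [ih (by rw [List.length_eraseIdx_of_lt h, List.length_eraseIdx_of_lt hid]; omega) h1
          (by rw [List.length_eraseIdx_of_lt h]; omega)]
    have hkt : (k.eraseIdx i).take i = k.take i := by
      simp [List.eraseIdx_eq_take_drop_succ, List.take_append, List.take_take]
      omega
    have hdt : (d.eraseIdx i).take i = d.take i := by
      simp [List.eraseIdx_eq_take_drop_succ, List.take_append, List.take_take]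
      omega
    have hkd : (k.eraseIdx i).drop i = k.drop (i + 1) := by
      simp [List.eraseIdx_eq_take_drop_succ,
        Nat.min_eq_left (le_of_lt h)]
    have hdd : (d.eraseIdx i).drop i = d.drop (i + 1) := by
      simp [List.eraseIdx_eq_take_drop_succ,
        Nat.min_eq_left (le_of_lt hid)]
    have hglast : (d.eraseIdx i).getD (i - 1) 0 = d.getD (i - 1) 0 := by
      have h' : i - 1 < d.length := by omega
      have h'' : i - 1 < (d.eraseIdx i).length := by
        rw [List.length_eraseIdx_of_lt hid]; omega
      rw [List.getD_eq_getElem _ _ h'', List.getD_eq_getElem _ _ h',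
          List.getElem_eraseIdx]
      simp [show i - 1 < i by omega]
    have hdropm : (d.eraseIdx i).drop (k.eraseIdx i).length = d.drop k.length := by
      rw [List.length_eraseIdx_of_lt h, List.eraseIdx_eq_take_drop_succ, List.drop_append]
      rw [List.drop_eq_nil_of_le (by simp [Nat.min_eq_left (le_of_lt hid)]; omega)]
      rw [List.drop_drop]
      simp [Nat.min_eq_left (le_of_lt hid)]
      congr 1
      omega
    rw [hkt, hdt, hkd, hdd, hglast, hdropm]
    have hkc : k.drop i = k[i] :: k.drop (i + 1) := List.drop_eq_getElem_cons h
    have hdc : d.drop i = d[i] :: d.drop (i + 1) := List.drop_eq_getElem_cons hid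
    have hgi : d.getD i 0 = d[i] := List.getD_eq_getElem _ _ hid
    rw [hkc, hdc, filtP]
    rw [hgi] at hcond
    rw [if_pos hcond]
  | case2 k d i h hcond ih =>
    rw [delLoopA, dif_pos h, if_neg hcond]
    have hid : i < d.length := lt_of_lt_of_le h hlen
    rw [ih hlen (by omega) h]
    have hsucc : i + 1 - 1 = i := by omega
    rw [hsucc]
    have hkc : k.drop i = k[i] :: k.drop (i + 1) := List.drop_eq_getElem_cons h
    have hdc : d.drop i = d[i] :: d.drop (i + 1) := List.drop_eq_getElem_cons hid
    have hgi : d.getD i 0 = d[i] := List.getD_eq_getElem _ _ hid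
    rw [hkc, hdc, filtP]
    rw [hgi] at hcond
    rw [if_neg hcond, hgi]
    have ht1 : k.take (i + 1) = k.take i ++ [k[i]] := by
      rw [List.take_add_one, List.getElem?_eq_getElem h]; rfl
    have ht2 : d.take (i + 1) = d.take i ++ [d[i]] := by
      rw [List.take_add_one, List.getElem?_eq_getElem hid]; rfl
    simp only [Prod.mk.injEq]
    refine ⟨?_, ?_⟩
    · rw [ht1, List.append_assoc, List.singleton_append]
    · rw [ht2]; simp only [List.append_assoc, List.singleton_append]
  | case3 k d i h =>
    rw [delLoopA, dif_neg h]
    have he : i = k.length := by omega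
    subst he
    simp [List.drop_length, filtP, List.take_of_length_le (le_refl k.length),
      List.take_append_drop]

-- indices B's marking pass drops, and the running "last kept value"
def dropIdx : Int → Int → List Int → List Int → List Int
  | last, i, _ :: ks, b :: ds =>
    if b > last then i :: dropIdx last (i + 1) ks ds else dropIdx b (i + 1) ks ds
  | _, _, _, _ => []

def lastVal : Int → List Int → List Int → Int
  | last, _ :: ks, b :: ds =>
    if b > last then lastVal last ks ds else lastVal b ks ds
  | last, _, _ => last

theorem mem_dropIdx {last i : Int} {ks ds : List Int} {j : Int}
    (h : j ∈ dropIdx last i ks ds) : i ≤ j ∧ j < i + ks.length := by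
  induction last, i, ks, ds using dropIdx.induct generalizing j with
  | case1 last i a ks b ds hgt ih =>
    rw [dropIdx, if_pos hgt] at h
    rcases List.mem_cons.mp h with h | h
    · subst h; simp only [List.length_cons]; omega
    · have := ih h; simp only [List.length_cons] at *; omega
  | case2 last i a ks b ds hgt ih =>
    rw [dropIdx, if_neg hgt] at h
    have := ih h; simp only [List.length_cons] at *; omega
  | case3 last i ks ds hne =>
    rw [dropIdx.eq_def] at h
    rcases ks with _ | ⟨a, ks⟩ <;> rcases ds with _ | ⟨b, ds⟩ <;> simp at h

theorem foldB_eq_dropIdx (ks ds : List Int) (i last : Int) (S : List Int)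
    (hS : ∀ j ∈ S, j < i) :
    (PySem.List.enumerate (List.zip ks ds) i).foldl
      (fun (s : PySem.Set Int × Option Int) p =>
        match s.2 with
        | none => (s.1, some p.2.2)
        | some last => if p.2.2 ≤ last then (s.1, some p.2.2) else (PySem.Set.add s.1 p.1, s.2))
      (S, some last)
    = (S ++ dropIdx last i ks ds, some (lastVal last ks ds)) := by
  induction ks generalizing ds i last S with
  | nil => simp [dropIdx, lastVal, PySem.List.enumerate_nil]
  | cons a ks ih =>
    rcases ds with _ | ⟨b, ds⟩
    · simp [dropIdx, lastVal, PySem.List.enumerate_nil]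
    · rw [List.zip_cons_cons, PySem.List.enumerate_cons, List.foldl_cons]
      by_cases hgt : b > last
      · have hble : ¬ b ≤ last := not_le.mpr hgt
        simp only [hble, if_false]
        rw [show (PySem.Set.add S i) = S ++ [i] from
              PySem.Set.add_of_not_mem (fun hm => absurd (hS i hm) (lt_irrefl i))]
        rw [ih ds (i + 1) last (S ++ [i])
              (by intro j hj; rcases List.mem_append.mp hj with h | h
                  · exact lt_trans (hS j h) (by omega)
                  · simp at h; omega)]
        rw [dropIdx, if_pos hgt, lastVal, if_pos hgt]
        simp
      · have hble : b ≤ last := not_lt.mp hgt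
        simp only [if_pos hble]
        rw [ih ds (i + 1) b S (fun j hj => lt_trans (hS j hj) (by omega))]
        rw [dropIdx, if_neg hgt, lastVal, if_neg hgt]

theorem filterK_eq_filtP (ks : List Int) (ds : List Int) (i last : Int)
    (hlen : ks.length ≤ ds.length) :
    ((PySem.List.enumerate ks i).filter
        (fun p => !(PySem.Set.contains (dropIdx last i ks ds) p.1))).map (·.2)
    = (filtP last ks ds).1 := by
  induction ks generalizing ds i last with
  | nil => simp [filtP, PySem.List.enumerate_nil]
  | cons a ks ih =>
    rcases ds with _ | ⟨b, ds⟩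
    · simp at hlen
    · rw [PySem.List.enumerate_cons]
      by_cases hgt : b > last
      · rw [dropIdx, if_pos hgt, filtP, if_pos hgt]
        rw [List.filter_cons]
        rw [if_neg (by simp [PySem.Set.contains_eq_listContains])]
        rw [List.filter_congr (l := PySem.List.enumerate ks (i + 1))
              (p := fun p => !(PySem.Set.contains (i :: dropIdx last (i + 1) ks ds) p.1))
              (q := fun p => !(PySem.Set.contains (dropIdx last (i + 1) ks ds) p.1))
              ?_]
        · exact ih ds (i + 1) last (by simpa using hlen)
        · intro p hp
          rcases (PySem.List.mem_enumerate_iff _ _ _).mp hp with ⟨m, hm, rfl⟩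
          simp only [PySem.Set.contains_eq_listContains]
          have : (i + 1 + (m : Int)) ≠ i := by omega
          simp [List.contains_cons, this]
      · rw [dropIdx, if_neg hgt, filtP, if_neg hgt]
        rw [List.filter_cons]
        have hmem : i ∉ dropIdx b (i + 1) ks ds := by
          intro hm; have := mem_dropIdx hm; omega
        rw [if_pos (by simp [PySem.Set.contains_eq_listContains, hmem])]
        rw [List.map_cons]
        rw [ih ds (i + 1) b (by simpa using hlen)]

theorem filterD_eq_filtP (ks : List Int) (ds : List Int) (i last : Int) :
    ((PySem.List.enumerate ds i).filter
        (fun p => !(PySem.Set.contains (dropIdx last i ks ds) p.1))).map (·.2)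
    = (filtP last ks ds).2.1 ++ ds.drop ks.length := by
  induction ks generalizing ds i last with
  | nil =>
    rw [show dropIdx last i [] ds = [] from by rw [dropIdx.eq_def]]
    simp [filtP, PySem.List.map_snd_enumerate, List.filter_eq_self.mpr]
  | cons a ks ih =>
    rcases ds with _ | ⟨b, ds⟩
    · simp [filtP, PySem.List.enumerate_nil]
    · rw [PySem.List.enumerate_cons]
      by_cases hgt : b > last
      · rw [dropIdx, if_pos hgt, filtP, if_pos hgt]
        rw [List.filter_cons]
        rw [if_neg (by simp [PySem.Set.contains_eq_listContains])]
        rw [List.filter_congr (l := PySem.List.enumerate ds (i + 1))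
              (p := fun p => !(PySem.Set.contains (i :: dropIdx last (i + 1) ks ds) p.1))
              (q := fun p => !(PySem.Set.contains (dropIdx last (i + 1) ks ds) p.1))
              ?_]
        · rw [ih ds (i + 1) last]; simp
        · intro p hp
          rcases (PySem.List.mem_enumerate_iff _ _ _).mp hp with ⟨m, hm, rfl⟩
          simp only [PySem.Set.contains_eq_listContains]
          have : (i + 1 + (m : Int)) ≠ i := by omega
          simp [List.contains_cons, this]
      · rw [dropIdx, if_neg hgt, filtP, if_neg hgt]
        rw [List.filter_cons]
        have hmem : i ∉ dropIdx b (i + 1) ks ds := by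
          intro hm; have := mem_dropIdx hm; omega
        rw [if_pos (by simp [PySem.Set.contains_eq_listContains, hmem])]
        rw [List.map_cons, ih ds (i + 1) b]
        simp

-- ===== VERDICT (by name: the statement is the Claim_ definition above) =====
theorem del_outlier_spec : Claim_equal_del_outlier := by
  intro k d _ hpre
  unfold Spec_del_outlier del_outlier del_outlier_alt
  rcases k with _ | ⟨a, k'⟩
  · -- k = []
    rw [delLoopA, dif_neg (by simp)]
    simp [PySem.List.enumerate_nil, PySem.List.map_snd_enumerate,
      List.filter_eq_self.mpr, PySem.Set.contains_eq_listContains, PySem.Set.empty]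
  · rcases d with _ | ⟨b, d'⟩
    · -- d = [], so by Pre_ k = [a]
      have hk' : k' = [] := by
        rcases hpre with h | h <;> simp at h <;> simp [h]
      subst hk'
      rw [delLoopA, dif_neg (by simp)]
      simp [PySem.List.enumerate_nil, PySem.List.enumerate_cons,
        PySem.Set.contains_eq_listContains, PySem.Set.empty]
    · -- main case
      have hlen : (a :: k').length ≤ (b :: d').length := by
        rcases hpre with h | h
        · simp at h; simp [h]
        · exact h
      rw [delLoopA_eq_filtP _ _ 1 hlen le_rfl (by simp)]
      simp only [List.zip_cons_cons, PySem.List.enumerate_cons, List.foldl_cons]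
      simp only [zero_add]
      rw [foldB_eq_dropIdx k' d' 1 b PySem.Set.empty (by intro j hj; simp [PySem.Set.empty] at hj)]
      simp only [PySem.Set.empty, List.nil_append]
      rw [List.filter_cons, List.filter_cons]
      have h0 : (0 : Int) ∉ dropIdx b 1 k' d' := by
        intro hm; have := mem_dropIdx hm; omega
      rw [if_pos (by simp [PySem.Set.contains_eq_listContains, h0]),
          if_pos (by simp [PySem.Set.contains_eq_listContains, h0])]
      rw [List.map_cons, List.map_cons]
      rw [filterK_eq_filtP k' d' 1 b (by simpa using hlen)]
      rw [filterD_eq_filtP k' d' 1 b]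
      simp [filtP, List.take_one, List.drop_one]
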